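-- pv_equiv track=rewrite | github.com/artilugio0/competitive-programming-problems | codeforces_2027C.py | solve
-- ===== SOURCE A (Python) =====
-- def solve(g, s):
--     best = 0
--     next = [s]
--     seen = set()
--     while next:
--         a = next.pop()
--         if a in seen:
--             continue
--         seen.add(a)
--
--         best = max(best, a)
--
--         for n in g[a]:
--             if n != a:
--                 next.append(n)
--
--     return best
-- ===== SOURCE B (Python) =====
-- def solve(g, s):
--     # Level-synchronous BFS closure instead of a LIFO stack DFS: the max over
--     # the reachable set does not depend on visit order.
--     seen = {s}
--     frontier = {s}
--     while frontier:
--         frontier = {n for a in frontier for n in g[a]} - seen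
--         seen |= frontier
--     return max(0, max(seen))
-- ===== Notes on version B (the rewrite author's own statement) =====
-- stated objective: alternative
-- what changed: Replaces the LIFO-stack DFS with per-node max updates by a level-synchronous BFS frontier closure over sets, returning max(0, max(seen)) once the reachable set is complete.
import Mathlib
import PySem

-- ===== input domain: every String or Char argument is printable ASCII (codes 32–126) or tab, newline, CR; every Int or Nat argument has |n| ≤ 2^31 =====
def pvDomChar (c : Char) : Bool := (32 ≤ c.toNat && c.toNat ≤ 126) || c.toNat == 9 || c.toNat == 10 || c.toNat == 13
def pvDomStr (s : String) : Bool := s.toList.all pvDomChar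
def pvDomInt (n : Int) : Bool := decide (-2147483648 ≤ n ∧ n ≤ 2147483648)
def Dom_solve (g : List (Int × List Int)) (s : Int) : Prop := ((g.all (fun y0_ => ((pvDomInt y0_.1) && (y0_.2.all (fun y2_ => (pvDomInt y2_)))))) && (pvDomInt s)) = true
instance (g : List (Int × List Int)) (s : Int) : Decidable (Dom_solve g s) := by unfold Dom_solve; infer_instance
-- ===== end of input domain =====

-- B replaces A's LIFO-stack DFS by a level-synchronous BFS set closure (same cost; a different traversal,
-- correct because the returned value max(0, max(reachable set)) does not depend on visit order).


-- ===== PORT A =====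

-- g[a] where it exists (Python raises KeyError on a missing key; Pre_solve excludes those runs,
-- so inside Pre_ the `getD []` default is never taken).
def pvNbrs (g : List (Int × List Int)) (a : Int) : List Int :=
  ((PySem.Dict.mk g).get? a).getD []

-- every value that can ever sit on the worklist: s and all listed neighbours (termination universe only)
def pvUniv (g : List (Int × List Int)) (s : Int) : List Int := s :: g.flatMap Prod.snd

lemma pvNbrs_subset (g : List (Int × List Int)) (a : Int) :
    ∀ n ∈ pvNbrs g a, n ∈ g.flatMap Prod.snd := by
  induction g with
  | nil => simp [pvNbrs, PySem.Dict.get?]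
  | cons p t ih =>
    intro n hn
    rcases p with ⟨k, v⟩
    rw [pvNbrs, PySem.Dict.get?_mk_cons] at hn
    by_cases hk : (k == a) = true
    · simp [hk] at hn
      exact List.mem_flatMap.mpr ⟨(k, v), List.mem_cons_self .., hn⟩
    · simp only [hk] at hn
      have := ih n (by simpa [pvNbrs] using hn)
      simp only [List.flatMap_cons]
      exact List.mem_append_right _ this

-- strict decrease of the unseen-count measure
lemma pv_not_contains (s : List Int) (x : Int) :
    (!(PySem.Set.contains s x)) = true ↔ x ∉ s := by
  by_cases h : x ∈ s
  · simp [h]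
  · constructor
    · intro _; exact h
    · intro _
      cases hc : PySem.Set.contains s x
      · rfl
      · exact absurd ((PySem.Set.contains_iff s x).mp hc) h

lemma pv_filter_le (univ : List Int) (p q : Int → Bool) (himp : ∀ x, p x = true → q x = true) :
    (univ.filter p).length ≤ (univ.filter q).length := by
  induction univ with
  | nil => simp
  | cons x t ih =>
    by_cases hp : p x = true
    · simp [hp, himp x hp]; omega
    · by_cases hq : q x = true <;>
        simp [hp, hq] <;> omega

lemma pv_filter_lt_aux (p q : Int → Bool) (himp : ∀ x, p x = true → q x = true)
    (univ : List Int) (a : Int) (ha : a ∈ univ) (hpa : p a = false) (hqa : q a = true) :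
    (univ.filter p).length < (univ.filter q).length := by
  induction univ with
  | nil => cases ha
  | cons x u ih =>
    rcases List.mem_cons.mp ha with rfl | hau
    · rw [List.filter_cons, List.filter_cons, hpa, hqa]
      have := pv_filter_le u p q himp
      simp; omega
    · have h := ih hau
      rw [List.filter_cons, List.filter_cons]
      by_cases hp : p x = true
      · rw [hp, himp x hp]; simpa using Nat.succ_lt_succ h
      · have hp' : p x = false := by
          cases hpx : p x
          · rfl
          · exact absurd hpx hp
        rw [hp']
        by_cases hq : q x = true
        · rw [hq]; simp; omega
        · have hq' : q x = false := by
            cases hqx : q x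
            · rfl
            · exact absurd hqx hq
          rw [hq']; simp; omega

lemma pv_filter_lt (univ : List Int) (s t : List Int) (hsub : ∀ x ∈ s, x ∈ t)
    (a : Int) (ha : a ∈ univ) (hat : a ∈ t) (has : a ∉ s) :
    (univ.filter (fun x => !(PySem.Set.contains t x))).length
      < (univ.filter (fun x => !(PySem.Set.contains s x))).length := by
  apply pv_filter_lt_aux _ _ ?himp univ a ha ?hpa ?hqa
  case himp =>
    intro x hx
    exact (pv_not_contains s x).mpr (fun hm => (pv_not_contains t x).mp hx (hsub x hm))
  case hpa =>
    cases hc : (!(PySem.Set.contains t a))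
    · rfl
    · exact absurd ((pv_not_contains t a).mp hc) (by simpa using hat)
  case hqa => exact (pv_not_contains s a).mpr has

-- A, transliterated: best = 0; next = [s]; seen = set(); while next: a = next.pop();
-- skip if seen; seen.add(a); best = max(best, a); push the n != a neighbours.
-- (hstack is termination scaffolding only: everything on the worklist lies in pvUniv.)
def pvLoopA (g : List (Int × List Int)) (s : Int) (stack : List Int)
    (seen : PySem.Set Int) (best : Int)
    (hstack : ∀ x ∈ stack, x ∈ pvUniv g s) : Int :=
  if hne : stack = [] then best
  else
    let a := stack.getLast hne
    if hmem : PySem.Set.contains seen a = true then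
      pvLoopA g s stack.dropLast seen best
        (fun x hx => hstack x (List.mem_of_mem_dropLast hx))
    else
      pvLoopA g s (stack.dropLast ++ (pvNbrs g a).filter (fun n => decide (n ≠ a)))
        (PySem.Set.add seen a) (max best a)
        (fun x hx => by
          rcases List.mem_append.mp hx with h | h
          · exact hstack x (List.mem_of_mem_dropLast h)
          · exact List.mem_cons.mpr (Or.inr (pvNbrs_subset g a x (List.mem_of_mem_filter h))))
termination_by (((pvUniv g s).filter (fun x => !(PySem.Set.contains seen x))).length, stack.length)
decreasing_by
  · apply Prod.Lex.right
    have h1 : 0 < stack.length := List.length_pos_of_ne_nil hne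
    simp only [List.length_dropLast]; omega
  · apply Prod.Lex.left
    apply pv_filter_lt _ seen (PySem.Set.add seen a)
    · intro x hx; exact (PySem.Set.mem_add _ _ _).mpr (Or.inl hx)
    · exact hstack _ (List.getLast_mem hne)
    · exact (PySem.Set.mem_add _ _ _).mpr (Or.inr rfl)
    · intro hm; exact hmem ((PySem.Set.contains_iff _ _).mpr hm)

def solve (g : List (Int × List Int)) (s : Int) : Int :=
  pvLoopA g s [s] PySem.Set.empty 0 (fun x hx => by
    simp only [List.mem_singleton] at hx; simp [pvUniv, hx])

-- ===== PORT B =====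

-- B, transliterated: seen = {s}; frontier = {s}; while frontier:
--   frontier = {n for a in frontier for n in g[a]} - seen; seen |= frontier; return max(0, max(seen)).
-- (hf is termination scaffolding only.)
def pvExpand (g : List (Int × List Int)) (frontier : List Int) : List Int :=
  frontier.flatMap (fun a => pvNbrs g a)

lemma pvExpand_subset (g : List (Int × List Int)) (frontier : List Int) :
    ∀ x ∈ pvExpand g frontier, x ∈ g.flatMap Prod.snd := by
  intro x hx
  rcases List.mem_flatMap.mp hx with ⟨a, _, hn⟩
  exact pvNbrs_subset g a x hn

def pvLoopB (g : List (Int × List Int)) (s : Int) (seen frontier : PySem.Set Int)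
    (_hf : ∀ x ∈ frontier, x ∈ pvUniv g s) : PySem.Set Int :=
  if hne : frontier = [] then seen
  else
    pvLoopB g s
      (PySem.Set.union seen (PySem.Set.diff (PySem.Set.ofList (pvExpand g frontier)) seen))
      (PySem.Set.diff (PySem.Set.ofList (pvExpand g frontier)) seen)
      (fun x hx => by
        have hx' := (PySem.Set.mem_diff _ _ _).mp hx
        have := (PySem.Set.mem_ofList _ _).mp hx'.1
        exact List.mem_cons.mpr (Or.inr (pvExpand_subset g frontier x this)))
termination_by (((pvUniv g s).filter (fun x => !(PySem.Set.contains seen x))).length, frontier.length)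
decreasing_by
  by_cases hf' : (PySem.Set.diff (PySem.Set.ofList (pvExpand g frontier)) seen) = []
  · rw [hf']
    have hu : PySem.Set.union seen ([] : List Int) = seen := rfl
    rw [hu]
    apply Prod.Lex.right
    have h1 : 0 < frontier.length := List.length_pos_of_ne_nil hne
    simpa using h1
  · apply Prod.Lex.left
    rcases List.exists_mem_of_ne_nil _ hf' with ⟨x, hx⟩
    have hx' := (PySem.Set.mem_diff _ _ _).mp hx
    apply pv_filter_lt _ seen _ (fun z hz => (PySem.Set.mem_union _ _ _).mpr (Or.inl hz)) x
    · exact List.mem_cons.mpr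
        (Or.inr (pvExpand_subset g frontier x ((PySem.Set.mem_ofList _ _).mp hx'.1)))
    · exact (PySem.Set.mem_union _ _ _).mpr (Or.inr hx)
    · exact hx'.2

def solve_alt (g : List (Int × List Int)) (s : Int) : Int :=
  let seen := pvLoopB g s (PySem.Set.ofList [s]) (PySem.Set.ofList [s])
    (fun x hx => by
      simp only [PySem.Set.mem_ofList, List.mem_singleton] at hx; simp [pvUniv, hx])
  max 0 ((PySem.List.max? seen (fun x => x)).getD 0)

-- ===== PRECONDITION & SPEC =====

-- one closure step of the neighbour relation (missing keys contribute nothing, as their lookup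
-- would already have raised)
def pvClosureStep (g : List (Int × List Int)) (V : List Int) : List Int :=
  (V ++ V.flatMap (fun a => pvNbrs g a)).dedup

-- Pre_ excludes exactly the inputs on which Python A raises KeyError: it holds iff s is a key of g
-- and every node reachable from s along listed edges (computed as the |g|-fold closure of {s},
-- which is past its fixpoint) is a key of g.
def Pre_solve (g : List (Int × List Int)) (s : Int) : Prop :=
  s ∈ g.map Prod.fst ∧ ∀ x ∈ (pvClosureStep g)^[g.length] [s], x ∈ g.map Prod.fst
instance (g : List (Int × List Int)) (s : Int) : Decidable (Pre_solve g s) := by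
  unfold Pre_solve; infer_instance

def pvWitness_solve : (List (Int × List Int)) × Int := ([(0, [1]), (1, [0, 1])], 0)

def Spec_solve (g : List (Int × List Int)) (s : Int) (out : Int) : Prop := out = solve_alt g s
instance (g : List (Int × List Int)) (s : Int) (out : Int) : Decidable (Spec_solve g s out) := by
  unfold Spec_solve; infer_instance

-- ===== CLAIM (what is proved, stated in full; the proofs are below) =====
def Claim_equal_solve : Prop :=
  ∀ (g : List (Int × List Int)) (s : Int), Dom_solve g s → Pre_solve g s → Spec_solve g s (solve g s)

-- ===== LEMMAS AND PROOFS =====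

-- x is reachable from t along listed edges whose every node (t and x included) avoids `seen`
inductive pvPA (g : List (Int × List Int)) (seen : List Int) : Int → Int → Prop
  | refl (t : Int) (ht : t ∉ seen) : pvPA g seen t t
  | step {t y n : Int} (hp : pvPA g seen t y) (hn : n ∈ pvNbrs g y) (hns : n ∉ seen) :
      pvPA g seen t n

lemma pvPA_start {g : List (Int × List Int)} {seen : List Int} {t x : Int}
    (h : pvPA g seen t x) : t ∉ seen := by
  induction h with
  | refl ht => exact ht
  | step _ _ _ ih => exact ih

lemma pvPA_mono {g : List (Int × List Int)} {s1 s2 : List Int} {t x : Int}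
    (hsub : ∀ z ∈ s1, z ∈ s2) (h : pvPA g s2 t x) : pvPA g s1 t x := by
  induction h with
  | refl ht => exact pvPA.refl _ (fun hm => ht (hsub _ hm))
  | step _ hn hns ih => exact pvPA.step ih hn (fun hm => hns (hsub _ hm))

lemma pvPA_decomp {g : List (Int × List Int)} {seen : List Int} {t x : Int} (a : Int)
    (h : pvPA g seen t x) :
    pvPA g (PySem.Set.add seen a) t x ∨ x = a ∨
      ∃ n, n ∈ pvNbrs g a ∧ pvPA g (PySem.Set.add seen a) n x := by
  induction h with
  | refl ht =>
    by_cases hu : t = a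
    · exact Or.inr (Or.inl hu)
    · exact Or.inl (pvPA.refl t (fun hm => by
        rcases (PySem.Set.mem_add _ _ _).mp hm with h' | h'
        · exact ht h'
        · exact hu h'))
  | step hp hn hns ih =>
    rename_i y n
    by_cases hna : n = a
    · exact Or.inr (Or.inl hna)
    · have hn' : n ∉ PySem.Set.add seen a := fun hm => by
        rcases (PySem.Set.mem_add _ _ _).mp hm with h' | h'
        · exact hns h'
        · exact hna h'
      rcases ih with h1 | h1 | ⟨m, hm1, hm2⟩
      · exact Or.inl (pvPA.step h1 hn hn')
      · subst h1
        exact Or.inr (Or.inr ⟨n, hn, pvPA.refl n hn'⟩)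
      · exact Or.inr (Or.inr ⟨m, hm1, pvPA.step hm2 hn hn'⟩)

lemma pvPA_through {g : List (Int × List Int)} {seen : List Int} {a n x : Int}
    (hn : n ∈ pvNbrs g a) (ha : a ∉ seen)
    (h : pvPA g (PySem.Set.add seen a) n x) : pvPA g seen a x := by
  induction h with
  | refl ht =>
    exact pvPA.step (pvPA.refl a ha) hn (fun hm => ht ((PySem.Set.mem_add _ _ _).mpr (Or.inl hm)))
  | step _ hn2 hns ih =>
    exact pvPA.step ih hn2 (fun hm => hns ((PySem.Set.mem_add _ _ _).mpr (Or.inl hm)))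

-- A-side: the loop's result bounds best and every node reachable from the stack avoiding seen …
lemma pvLoopA_ge (g : List (Int × List Int)) (s : Int) :
    ∀ (stack : List Int) (seen : PySem.Set Int) (best : Int)
      (h : ∀ x ∈ stack, x ∈ pvUniv g s),
      best ≤ pvLoopA g s stack seen best h ∧
        ∀ t ∈ stack, ∀ x, pvPA g seen t x → x ≤ pvLoopA g s stack seen best h := by
  intro stack seen best h
  induction stack, seen, best, h using pvLoopA.induct g s with
  | case1 seen best h =>
    rw [pvLoopA, dif_pos rfl]
    exact ⟨le_refl _, by simp⟩
  | case2 stack seen best h hne a hmem ih =>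
    rw [pvLoopA, dif_neg hne, dif_pos hmem]
    refine ⟨ih.1, ?_⟩
    intro t ht x hpa
    have hsplit : t ∈ stack.dropLast ∨ t = stack.getLast hne := by
      have := List.dropLast_append_getLast hne
      rw [← this] at ht
      rcases List.mem_append.mp ht with h' | h'
      · exact Or.inl h'
      · exact Or.inr (by simpa using h')
    rcases hsplit with h' | rfl
    · exact ih.2 t h' x hpa
    · exact absurd ((PySem.Set.contains_iff _ _).mp hmem) (pvPA_start hpa)
  | case3 stack seen best h hne a hmem ih =>
    rw [pvLoopA, dif_neg hne, dif_neg hmem]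
    have hseen : stack.getLast hne ∉ seen :=
      fun hm => hmem ((PySem.Set.contains_iff _ _).mpr hm)
    constructor
    · exact le_trans (le_max_left best _) ih.1
    · intro t ht x hpa
      have hsplit : t ∈ stack.dropLast ∨ t = stack.getLast hne := by
        have := List.dropLast_append_getLast hne
        rw [← this] at ht
        rcases List.mem_append.mp ht with h' | h'
        · exact Or.inl h'
        · exact Or.inr (by simpa using h')
      rcases pvPA_decomp (stack.getLast hne) hpa with h1 | h1 | ⟨n, hn1, hn2⟩
      · rcases hsplit with h' | rfl
        · exact ih.2 t (List.mem_append_left _ h') x h1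
        · exact absurd ((PySem.Set.mem_add _ _ _).mpr (Or.inr rfl)) (pvPA_start h1)
      · rw [h1]
        exact le_trans (le_max_right best _) ih.1
      · have hna : n ≠ stack.getLast hne := fun hE => by
          subst hE
          exact (pvPA_start hn2) ((PySem.Set.mem_add _ _ _).mpr (Or.inr rfl))
        have hmemf : n ∈ (pvNbrs g (stack.getLast hne)).filter
            (fun m => decide (m ≠ stack.getLast hne)) :=
          List.mem_filter.mpr ⟨hn1, by simpa using hna⟩
        exact ih.2 n (List.mem_append_right _ hmemf) x hn2

-- … and is either best itself or a node reachable from the stack avoiding seen.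
lemma pvLoopA_mem (g : List (Int × List Int)) (s : Int) :
    ∀ (stack : List Int) (seen : PySem.Set Int) (best : Int)
      (h : ∀ x ∈ stack, x ∈ pvUniv g s),
      pvLoopA g s stack seen best h = best ∨
        ∃ t ∈ stack, pvPA g seen t (pvLoopA g s stack seen best h) := by
  intro stack seen best h
  induction stack, seen, best, h using pvLoopA.induct g s with
  | case1 seen best h =>
    rw [pvLoopA, dif_pos rfl]; exact Or.inl rfl
  | case2 stack seen best h hne a hmem ih =>
    rw [pvLoopA, dif_neg hne, dif_pos hmem]
    rcases ih with h1 | ⟨t, ht, hpa⟩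
    · exact Or.inl h1
    · exact Or.inr ⟨t, List.mem_of_mem_dropLast ht, hpa⟩
  | case3 stack seen best h hne a hmem ih =>
    rw [pvLoopA, dif_neg hne, dif_neg hmem]
    have hseen : stack.getLast hne ∉ seen :=
      fun hm => hmem ((PySem.Set.contains_iff _ _).mpr hm)
    have haS : stack.getLast hne ∈ stack := List.getLast_mem hne
    rcases ih with h1 | ⟨t, ht, hpa⟩
    · rcases max_choice best (stack.getLast hne) with h2 | h2
      · exact Or.inl (h1.trans h2)
      · exact Or.inr ⟨stack.getLast hne, haS, by
          rw [h1, h2]; exact pvPA.refl _ hseen⟩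
    · rcases List.mem_append.mp ht with h' | h'
      · exact Or.inr ⟨t, List.mem_of_mem_dropLast h',
          pvPA_mono (fun z hz => (PySem.Set.mem_add _ _ _).mpr (Or.inl hz)) hpa⟩
      · have hn1 : t ∈ pvNbrs g (stack.getLast hne) := List.mem_of_mem_filter h'
        exact Or.inr ⟨stack.getLast hne, haS, pvPA_through hn1 hseen hpa⟩

-- B-side: everything collected is reachable from s …
lemma pvLoopB_sound (g : List (Int × List Int)) (s : Int) :
    ∀ (seen frontier : PySem.Set Int) (h : ∀ x ∈ frontier, x ∈ pvUniv g s),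
      (∀ x ∈ seen, pvPA g [] s x) → (∀ x ∈ frontier, pvPA g [] s x) →
      ∀ x ∈ pvLoopB g s seen frontier h, pvPA g [] s x := by
  intro seen frontier h
  induction seen, frontier, h using pvLoopB.induct g s with
  | case1 seen h =>
    intro hs _ x hx
    rw [pvLoopB, dif_pos rfl] at hx
    exact hs x hx
  | case2 seen frontier h hne ih =>
    intro hs hfr x hx
    rw [pvLoopB, dif_neg hne] at hx
    apply ih _ _ x hx
    · intro z hz
      rcases (PySem.Set.mem_union _ _ _).mp hz with h1 | h1
      · exact hs z h1
      · have h2 := (PySem.Set.mem_diff _ _ _).mp h1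
        rcases List.mem_flatMap.mp ((PySem.Set.mem_ofList _ _).mp h2.1) with ⟨a, ha, hn⟩
        exact pvPA.step (hfr a ha) hn (by simp)
    · intro z hz
      have h2 := (PySem.Set.mem_diff _ _ _).mp hz
      rcases List.mem_flatMap.mp ((PySem.Set.mem_ofList _ _).mp h2.1) with ⟨a, ha, hn⟩
      exact pvPA.step (hfr a ha) hn (by simp)

-- … and everything reachable from a collected node gets collected.
lemma pvLoopB_complete (g : List (Int × List Int)) (s : Int) :
    ∀ (seen frontier : PySem.Set Int) (h : ∀ x ∈ frontier, x ∈ pvUniv g s),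
      (∀ a ∈ seen, a ∉ frontier → ∀ n ∈ pvNbrs g a, n ∈ seen) →
      (∀ x ∈ frontier, x ∈ seen) →
      ∀ t x, t ∈ seen → pvPA g [] t x → x ∈ pvLoopB g s seen frontier h := by
  intro seen frontier h
  induction seen, frontier, h using pvLoopB.induct g s with
  | case1 seen h =>
    intro hcl _ t x ht hpa
    rw [pvLoopB, dif_pos rfl]
    induction hpa with
    | refl _ => exact ht
    | step hp hn _ ih => exact hcl _ ih (by simp) _ hn
  | case2 seen frontier h hne ih =>
    intro hcl hfs t x ht hpa
    rw [pvLoopB, dif_neg hne]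
    apply ih
    · intro a ha hanf n hn
      rcases (PySem.Set.mem_union _ _ _).mp ha with h1 | h1
      · by_cases haf : a ∈ frontier
        · have hnf : n ∈ PySem.Set.ofList (pvExpand g frontier) :=
            (PySem.Set.mem_ofList _ _).mpr (List.mem_flatMap.mpr ⟨a, haf, hn⟩)
          by_cases hns : n ∈ seen
          · exact (PySem.Set.mem_union _ _ _).mpr (Or.inl hns)
          · exact (PySem.Set.mem_union _ _ _).mpr
              (Or.inr ((PySem.Set.mem_diff _ _ _).mpr ⟨hnf, hns⟩))
        · exact (PySem.Set.mem_union _ _ _).mpr (Or.inl (hcl a h1 haf n hn))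
      · exact absurd h1 hanf
    · intro z hz
      exact (PySem.Set.mem_union _ _ _).mpr (Or.inr hz)
    · exact (PySem.Set.mem_union _ _ _).mpr (Or.inl ht)
    · exact hpa

-- the two loop results coincide (stated over arbitrary termination-scaffold proofs)
lemma pv_key (g : List (Int × List Int)) (s : Int)
    (hA : ∀ x ∈ ([s] : List Int), x ∈ pvUniv g s)
    (hB : ∀ x ∈ PySem.Set.ofList [s], x ∈ pvUniv g s) :
    pvLoopA g s [s] PySem.Set.empty 0 hA
      = max 0 ((PySem.List.max? (pvLoopB g s (PySem.Set.ofList [s]) (PySem.Set.ofList [s]) hB)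
          (fun x => x)).getD 0) := by
  have hof : (PySem.Set.ofList [s] : List Int) = [s] :=
    PySem.Set.ofList_eq_self_of_nodup [s] (by simp)
  have hsound : ∀ x ∈ pvLoopB g s (PySem.Set.ofList [s]) (PySem.Set.ofList [s]) hB,
      pvPA g [] s x := by
    apply pvLoopB_sound
    · intro x hx; rw [hof] at hx
      simp only [List.mem_singleton] at hx; subst hx; exact pvPA.refl _ (by simp)
    · intro x hx; rw [hof] at hx
      simp only [List.mem_singleton] at hx; subst hx; exact pvPA.refl _ (by simp)
  have hcompl : ∀ x, pvPA g [] s x →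
      x ∈ pvLoopB g s (PySem.Set.ofList [s]) (PySem.Set.ofList [s]) hB := by
    intro x hpa
    apply pvLoopB_complete g s _ _ _ ?hcl ?hfs s x ?hts hpa
    case hcl =>
      intro a ha hanf
      rw [hof] at ha hanf
      simp only [List.mem_singleton] at ha
      exact absurd (by simp [ha]) hanf
    case hfs => intro z hz; exact hz
    case hts => rw [hof]; simp
  have hsS : s ∈ pvLoopB g s (PySem.Set.ofList [s]) (PySem.Set.ofList [s]) hB :=
    hcompl s (pvPA.refl _ (by simp))
  rcases hmax : PySem.List.max? (pvLoopB g s (PySem.Set.ofList [s]) (PySem.Set.ofList [s]) hB)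
      (fun x => x) with _ | m
  · exact absurd (((PySem.List.max?_eq_none_iff _ _).mp hmax)) (List.ne_nil_of_mem hsS)
  have hmS := PySem.List.max?_mem hmax
  have hub : ∀ y ∈ pvLoopB g s (PySem.Set.ofList [s]) (PySem.Set.ofList [s]) hB, y ≤ m :=
    fun y hy => PySem.List.max?_isMax hmax y hy
  have hA1 := pvLoopA_ge g s [s] PySem.Set.empty 0 hA
  have hA2 := pvLoopA_mem g s [s] PySem.Set.empty 0 hA
  simp only [Option.getD_some]
  have h0R : (0 : Int) ≤ pvLoopA g s [s] PySem.Set.empty 0 hA := hA1.1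
  have hmR : m ≤ pvLoopA g s [s] PySem.Set.empty 0 hA :=
    hA1.2 s (by simp) m (hsound m hmS)
  have hRle : pvLoopA g s [s] PySem.Set.empty 0 hA ≤ max 0 m := by
    rcases hA2 with h1 | ⟨t, ht, hpa⟩
    · rw [h1]; exact le_max_left _ _
    · simp only [List.mem_singleton] at ht; subst ht
      exact le_trans (hub _ (hcompl _ hpa)) (le_max_right _ _)
  exact le_antisymm hRle (max_le h0R hmR)

-- ===== VERDICT (by name: the statement is the Claim_ definition above) =====
theorem solve_spec : Claim_equal_solve := by
  intro g s _ _
  unfold Spec_solve solve solve_alt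
  exact pv_key g s _ _
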